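-- pv_equiv track=rewrite | github.com/Tantless/ifThen | src/if_then_mvp/parser.py | _final_block_continuation_tail_penalty
-- ===== SOURCE A (Python) =====
-- def _final_block_continuation_tail_penalty(
--     lines: list[str],
--     candidate_start_indices: list[int],
--     selected_start_index: int,
-- ) -> int:
--     first_nested_candidate_index = next(
--         (start_index for start_index in candidate_start_indices if start_index > selected_start_index),
--         None,
--     )
--     if first_nested_candidate_index is None:
--         return 0
--
--     timestamp_index = _next_nonblank_line_index(lines, selected_start_index + 1)
--     if timestamp_index is None:
--         return 0
--     content_index = _next_nonblank_line_index(lines, timestamp_index + 1)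
--     if content_index is None:
--         return 0
--
--     for line in lines[content_index + 1 : first_nested_candidate_index]:
--         if line.strip():
--             return 1
--     return 0
--
-- def _next_nonblank_line_index(lines: list[str], start_index: int) -> int | None:
--     for index in range(start_index, len(lines)):
--         if lines[index].strip():
--             return index
--     return None
-- ===== SOURCE B (Python) =====
-- def _final_block_continuation_tail_penalty(
--     lines: list[str],
--     candidate_start_indices: list[int],
--     selected_start_index: int,
-- ) -> int:
--     first_nested_candidate_index = next(
--         (start_index for start_index in candidate_start_indices if start_index > selected_start_index),
--         None,
--     )
--     if first_nested_candidate_index is None: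
--         return 0
--     nonblank_count = sum(
--         1
--         for line in lines[selected_start_index + 1 : first_nested_candidate_index]
--         if line.strip()
--     )
--     return 1 if nonblank_count >= 3 else 0
-- ===== Notes on version B (the rewrite author's own statement) =====
-- stated objective: simpler
-- what changed: Replaces the two unbounded next-nonblank helper searches plus a tail scan with a single bounded count of non-blank lines in lines[selected_start_index+1 : first_nested_candidate_index], returning 1 iff that count is at least 3 (first two non-blanks are the timestamp and content, a third triggers the penalty); the helper function disappears.
-- outside the precondition, e.g. on _final_block_continuation_tail_penalty(['c', 'b ', 'c', 'b '], [9], -2): A returns 1, B returns 0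
import Mathlib
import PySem

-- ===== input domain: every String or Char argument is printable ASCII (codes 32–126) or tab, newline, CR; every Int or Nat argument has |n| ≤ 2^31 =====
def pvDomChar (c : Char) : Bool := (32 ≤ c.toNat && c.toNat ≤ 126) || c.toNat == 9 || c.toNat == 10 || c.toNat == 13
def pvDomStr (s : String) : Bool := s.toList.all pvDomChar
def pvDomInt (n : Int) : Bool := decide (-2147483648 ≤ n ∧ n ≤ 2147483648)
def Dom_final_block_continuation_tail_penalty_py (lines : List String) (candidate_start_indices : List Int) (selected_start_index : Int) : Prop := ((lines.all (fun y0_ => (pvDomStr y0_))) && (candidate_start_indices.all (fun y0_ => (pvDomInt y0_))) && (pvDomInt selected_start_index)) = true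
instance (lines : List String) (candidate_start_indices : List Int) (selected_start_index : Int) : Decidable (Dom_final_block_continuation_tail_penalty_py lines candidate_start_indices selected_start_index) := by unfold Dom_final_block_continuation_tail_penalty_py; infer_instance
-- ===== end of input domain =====

-- B replaces A's two unbounded next-nonblank helper searches plus a tail scan by one bounded
-- count of non-blank lines in lines[sel+1 : first_nested] with threshold 3 (simpler decomposition;
-- return values only, no mutation).

-- ===== PORT A =====
-- port of _next_nonblank_line_index: the range list is materialised, lines[index] is pyGet?
-- (none = IndexError, unreachable under Pre_, where every generated index is nonnegative)
def pvNextNonblankA (lines : List String) : List Int → Option Int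
  | [] => none
  | index :: rest =>
    match PySem.List.pyGet? lines index with
    | none => none
    | some s => if PySem.Str.strip s != "" then some index else pvNextNonblankA lines rest

def final_block_continuation_tail_penalty_py (lines : List String) (candidate_start_indices : List Int) (selected_start_index : Int) : Int :=
  match candidate_start_indices.find? (fun start_index => decide (start_index > selected_start_index)) with
  | none => 0
  | some first_nested_candidate_index =>
    match pvNextNonblankA lines (PySem.List.pyRange (selected_start_index + 1) ((lines.length : Int)) 1) with
    | none => 0
    | some timestamp_index =>
      match pvNextNonblankA lines (PySem.List.pyRange (timestamp_index + 1) ((lines.length : Int)) 1) with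
      | none => 0
      | some content_index =>
        if (PySem.List.slice lines (some (content_index + 1)) (some first_nested_candidate_index)).any
            (fun line => PySem.Str.strip line != "") then 1 else 0

-- ===== PORT B =====
def final_block_continuation_tail_penalty_py_alt (lines : List String) (candidate_start_indices : List Int) (selected_start_index : Int) : Int :=
  match candidate_start_indices.find? (fun start_index => decide (start_index > selected_start_index)) with
  | none => 0
  | some first_nested_candidate_index =>
    let nonblank_count :=
      (PySem.List.slice lines (some (selected_start_index + 1)) (some first_nested_candidate_index)).countP
        (fun line => PySem.Str.strip line != "")
    if 3 ≤ nonblank_count then 1 else 0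

-- ===== PRECONDITION & SPEC =====
-- Pre_ excludes negative selected_start_index: there A's helper searches index lines with Python's
-- negative-index semantics (wraparound from the end, or IndexError below -len), outside the natural
-- domain of a start index; B reads the bounded slice positionally there.
def Pre_final_block_continuation_tail_penalty_py (lines : List String) (candidate_start_indices : List Int) (selected_start_index : Int) : Prop := 0 ≤ selected_start_index
instance (lines : List String) (candidate_start_indices : List Int) (selected_start_index : Int) : Decidable (Pre_final_block_continuation_tail_penalty_py lines candidate_start_indices selected_start_index) := by unfold Pre_final_block_continuation_tail_penalty_py; infer_instance

def pvWitness_final_block_continuation_tail_penalty_py : List String × List Int × Int := (["ts", "content", "tail", "x"], [3], 0)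

def Spec_final_block_continuation_tail_penalty_py (lines : List String) (candidate_start_indices : List Int) (selected_start_index : Int) (out : Int) : Prop := out = final_block_continuation_tail_penalty_py_alt lines candidate_start_indices selected_start_index
instance (lines : List String) (candidate_start_indices : List Int) (selected_start_index : Int) (out : Int) : Decidable (Spec_final_block_continuation_tail_penalty_py lines candidate_start_indices selected_start_index out) := by unfold Spec_final_block_continuation_tail_penalty_py; infer_instance

-- ===== CLAIM (what is proved, stated in full; the proofs are below) =====
def Claim_equal_final_block_continuation_tail_penalty_py : Prop := ∀ (lines : List String) (candidate_start_indices : List Int) (selected_start_index : Int), Dom_final_block_continuation_tail_penalty_py lines candidate_start_indices selected_start_index → Pre_final_block_continuation_tail_penalty_py lines candidate_start_indices selected_start_index → Spec_final_block_continuation_tail_penalty_py lines candidate_start_indices selected_start_index (final_block_continuation_tail_penalty_py lines candidate_start_indices selected_start_index)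


-- ===== LEMMAS AND PROOFS =====

-- A's helper over range(a, len(lines)) with 0 ≤ a is findIdx? on the dropped suffix, shifted by a.
lemma pvNextNonblankA_eq (lines : List String) :
    ∀ (d a : Nat), lines.length ≤ a + d →
    pvNextNonblankA lines (PySem.List.pyRange ((a : Int)) ((lines.length : Int)) 1)
      = ((lines.drop a).findIdx? (fun s => PySem.Str.strip s != "")).map (fun k => ((a + k : Nat) : Int)) := by
  intro d
  induction d with
  | zero =>
    intro a ha
    rw [PySem.List.pyRange_one_eq_nil (by exact_mod_cast ha)]
    rw [List.drop_eq_nil_of_le (by omega)]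
    simp [pvNextNonblankA]
  | succ d ih =>
    intro a ha
    by_cases h : lines.length ≤ a
    · rw [PySem.List.pyRange_one_eq_nil (by exact_mod_cast h)]
      rw [List.drop_eq_nil_of_le h]
      simp [pvNextNonblankA]
    · have h' : a < lines.length := by omega
      rw [PySem.List.pyRange_one_cons (by exact_mod_cast h')]
      rw [← List.getElem_cons_drop h', List.findIdx?_cons]
      simp only [pvNextNonblankA, PySem.List.pyGet?_natCast, List.getElem?_eq_getElem h']
      by_cases hp : PySem.Str.strip lines[a] != ""
      · simp [hp]
      · have hcast : (a : Int) + 1 = ((a + 1 : Nat) : Int) := by push_cast; ring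
        simp only [hp, Bool.false_eq_true, if_false]
        rw [hcast, ih (a + 1) (by omega)]
        cases (lines.drop (a + 1)).findIdx? (fun s => PySem.Str.strip s != "") with
        | none => simp
        | some k => simp; ring

-- if the first match is at k, the first k+1 elements contain exactly one match
lemma pvCountTake1 {α : Type} (p : α → Bool) (u : List α) (k : Nat)
    (h : u.findIdx? p = some k) : (u.take (k + 1)).countP p = 1 := by
  obtain ⟨hk, hpk, hprev⟩ := List.findIdx?_eq_some_iff_getElem.mp h
  rw [List.take_add_one, List.countP_append, List.getElem?_eq_getElem hk]
  have h0 : (u.take k).countP p = 0 := by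
    apply List.countP_eq_zero.mpr
    intro a ha
    obtain ⟨j, hj, rfl⟩ := List.mem_take_iff_getElem.mp ha
    exact hprev j (by omega)
  simp [h0, hpk]

lemma pvCountNone {α : Type} (p : α → Bool) (u : List α) (m : Nat)
    (h : u.findIdx? p = none) : (u.take m).countP p = 0 := by
  apply List.countP_eq_zero.mpr
  intro a ha
  simp [List.findIdx?_eq_none_iff.mp h a (List.mem_of_mem_take ha)]

-- the heart, case by case: A's staged searches-and-scan equal B's threshold count,
-- over the suffix u (lines after the selected index) and window m (distance to the first nested candidate)
lemma pvCore0 {α : Type} (p : α → Bool) (u : List α) (m : Nat)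
    (h1 : u.findIdx? p = none) :
    (if 3 ≤ (u.take m).countP p then (1 : Int) else 0) = 0 := by
  rw [pvCountNone p u m h1]
  norm_num

lemma pvCore1 {α : Type} (p : α → Bool) (u : List α) (m k1 : Nat)
    (h1 : u.findIdx? p = some k1) (h2 : (u.drop (k1 + 1)).findIdx? p = none) :
    (if 3 ≤ (u.take m).countP p then (1 : Int) else 0) = 0 := by
  have hdz : (u.drop (k1 + 1)).countP p = 0 := by
    apply List.countP_eq_zero.mpr
    intro a ha
    simp [List.findIdx?_eq_none_iff.mp h2 a ha]
  have hle : (u.take m).countP p ≤ 1 := by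
    calc (u.take m).countP p ≤ u.countP p := (List.take_sublist m u).countP_le
      _ = 1 := by
        conv_lhs => rw [← List.take_append_drop (k1 + 1) u]
        rw [List.countP_append, pvCountTake1 p u k1 h1, hdz]
  rw [if_neg (by omega)]

lemma pvCore2 {α : Type} (p : α → Bool) (u : List α) (m k1 k2 : Nat)
    (h1 : u.findIdx? p = some k1) (h2 : (u.drop (k1 + 1)).findIdx? p = some k2) :
    (if ((u.drop ((k1 + 1) + (k2 + 1))).take (m - ((k1 + 1) + (k2 + 1)))).any p = true
       then (1 : Int) else 0)
    = if 3 ≤ (u.take m).countP p then 1 else 0 := by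
  have cK : (u.take ((k1 + 1) + (k2 + 1))).countP p = 2 := by
    rw [List.take_add, List.countP_append, pvCountTake1 p u k1 h1,
        pvCountTake1 p (u.drop (k1 + 1)) k2 h2]
  by_cases hm : m ≤ (k1 + 1) + (k2 + 1)
  · have hz : m - ((k1 + 1) + (k2 + 1)) = 0 := by omega
    have hle : (u.take m).countP p ≤ 2 := by
      calc (u.take m).countP p = ((u.take ((k1 + 1) + (k2 + 1))).take m).countP p := by
            rw [List.take_take, min_eq_left hm]
        _ ≤ (u.take ((k1 + 1) + (k2 + 1))).countP p := (List.take_sublist _ _).countP_le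
        _ = 2 := cK
    rw [hz]
    simp only [List.take_zero, List.any_nil, Bool.false_eq_true, if_false]
    rw [if_neg (by omega)]
  · have hsplit : u.take m
        = u.take ((k1 + 1) + (k2 + 1)) ++ (u.drop ((k1 + 1) + (k2 + 1))).take (m - ((k1 + 1) + (k2 + 1))) := by
      rw [← List.take_add]
      congr 1
      omega
    rw [hsplit, List.countP_append, cK]
    rcases hany : ((u.drop ((k1 + 1) + (k2 + 1))).take (m - ((k1 + 1) + (k2 + 1)))).any p with _ | _
    · have hcz : ((u.drop ((k1 + 1) + (k2 + 1))).take (m - ((k1 + 1) + (k2 + 1)))).countP p = 0 := by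
        apply List.countP_eq_zero.mpr
        intro a ha hpa
        have := List.any_eq_true.mpr ⟨a, ha, hpa⟩
        rw [hany] at this
        exact Bool.false_ne_true this
      rw [hcz]
      norm_num
    · obtain ⟨a, ha, hpa⟩ := List.any_eq_true.mp hany
      have hcp : 0 < ((u.drop ((k1 + 1) + (k2 + 1))).take (m - ((k1 + 1) + (k2 + 1)))).countP p :=
        List.countP_pos_iff.mpr ⟨a, ha, hpa⟩
      rw [if_pos rfl, if_pos (by omega)]

-- ===== VERDICT (by name: the statement is the Claim_ definition above) =====
theorem final_block_continuation_tail_penalty_py_spec : Claim_equal_final_block_continuation_tail_penalty_py := by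
  intro lines cands sel _ hpre
  unfold Spec_final_block_continuation_tail_penalty_py
  unfold final_block_continuation_tail_penalty_py final_block_continuation_tail_penalty_py_alt
  cases hf : cands.find? (fun start_index => decide (start_index > sel)) with
  | none => rfl
  | some f =>
    dsimp only
    have hsf : sel < f := by simpa using List.find?_some hf
    have hsel : 0 ≤ sel := hpre
    obtain ⟨s, rfl⟩ : ∃ s : Nat, sel = (s : Int) := ⟨sel.toNat, (Int.toNat_of_nonneg hsel).symm⟩
    obtain ⟨F, rfl⟩ : ∃ F : Nat, f = (F : Int) := ⟨f.toNat, (Int.toNat_of_nonneg (by omega)).symm⟩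
    have hc1 : (s : Int) + 1 = ((s + 1 : Nat) : Int) := by push_cast; ring
    rw [hc1, pvNextNonblankA_eq lines lines.length (s + 1) (by omega),
        PySem.List.slice_natCast lines (s + 1) F]
    set p : String → Bool := fun line => PySem.Str.strip line != "" with hp
    set u : List String := lines.drop (s + 1) with hu
    cases h1 : u.findIdx? p with
    | none =>
      simp only [Option.map_none]
      exact (pvCore0 p u (F - (s + 1)) h1).symm
    | some k1 =>
      simp only [Option.map_some]
      have hc2 : ((s + 1 + k1 : Nat) : Int) + 1 = ((s + 1 + (k1 + 1) : Nat) : Int) := by push_cast; ring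
      rw [hc2, pvNextNonblankA_eq lines lines.length (s + 1 + (k1 + 1)) (by omega)]
      have hdrop : lines.drop (s + 1 + (k1 + 1)) = u.drop (k1 + 1) := by
        rw [hu, List.drop_drop]
      rw [hdrop]
      cases h2 : (u.drop (k1 + 1)).findIdx? p with
      | none =>
        simp only [Option.map_none]
        exact (pvCore1 p u (F - (s + 1)) k1 h1 h2).symm
      | some k2 =>
        simp only [Option.map_some]
        have hc3 : ((s + 1 + (k1 + 1) + k2 : Nat) : Int) + 1 = ((s + 1 + ((k1 + 1) + (k2 + 1)) : Nat) : Int) := by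
          push_cast; ring
        rw [hc3, PySem.List.slice_natCast lines (s + 1 + ((k1 + 1) + (k2 + 1))) F]
        have hdrop2 : lines.drop (s + 1 + ((k1 + 1) + (k2 + 1))) = u.drop ((k1 + 1) + (k2 + 1)) := by
          rw [hu, List.drop_drop]
        have hsub : F - (s + 1 + ((k1 + 1) + (k2 + 1))) = (F - (s + 1)) - ((k1 + 1) + (k2 + 1)) := by
          omega
        rw [hdrop2, hsub]
        exact pvCore2 p u (F - (s + 1)) k1 k2 h1 h2
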